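-- pv_equiv track=rewrite | github.com/obadaq/PIS_HW1 | Functions.py | word_histogram
-- ===== SOURCE A (Python) =====
-- def word_histogram(org_str):
--     org_str = org_str.lower()
--     irrelevant_word = ["\n", ".", ",", "? ", "! ",
--                        "the ", "a ", " for ", "by ",
--                        "and ", "to ", " in ", "with ",
--                        "is ", "of ", "this ", "was ",
--                        "all ", "as", "its", "that",
--                        '"', "she", "on", "her", ' s', ' c', ' e']
--     for irr_word in irrelevant_word:
--         org_str = org_str.replace(irr_word, " ")
--
--     word_list = org_str.split(" ")
--
--     word_hist = {}
--     for word in word_list: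
--         if word not in word_hist.keys():
--             word_hist[word] = 1
--         else:
--             word_hist[word] = word_hist[word] + 1
--
--     word_hist.pop("")
--     return word_hist
-- ===== SOURCE B (Python) =====
-- def word_histogram(org_str):
--     text = org_str.lower()
--     for junk in ["\n", ".", ",", "? ", "! ",
--                  "the ", "a ", " for ", "by ",
--                  "and ", "to ", " in ", "with ",
--                  "is ", "of ", "this ", "was ",
--                  "all ", "as", "its", "that",
--                  '"', "she", "on", "her", ' s', ' c', ' e']:
--         text = text.replace(junk, " ")
--     words = text.split(" ")
--
--     # counts via sort + run-length grouping (uniq -c)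
--     counts = {}
--     run = None
--     run_len = 0
--     for w in sorted(words):
--         if w == run:
--             run_len += 1
--         else:
--             if run is not None:
--                 counts[run] = run_len
--             run, run_len = w, 1
--     if run is not None:
--         counts[run] = run_len
--
--     # distinct non-empty words, in first-occurrence order
--     hist = {}
--     for w in words:
--         if w != "" and w not in hist:
--             hist[w] = counts[w]
--     return hist
-- ===== Notes on version B (the rewrite author's own statement) =====
-- stated objective: alternative
-- what changed: The single incremental dict-counting pass is replaced by sort + run-length grouping (uniq -c) to compute the counts, followed by a first-occurrence pass that assembles the histogram of the non-empty words from those precomputed counts.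
import Mathlib
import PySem

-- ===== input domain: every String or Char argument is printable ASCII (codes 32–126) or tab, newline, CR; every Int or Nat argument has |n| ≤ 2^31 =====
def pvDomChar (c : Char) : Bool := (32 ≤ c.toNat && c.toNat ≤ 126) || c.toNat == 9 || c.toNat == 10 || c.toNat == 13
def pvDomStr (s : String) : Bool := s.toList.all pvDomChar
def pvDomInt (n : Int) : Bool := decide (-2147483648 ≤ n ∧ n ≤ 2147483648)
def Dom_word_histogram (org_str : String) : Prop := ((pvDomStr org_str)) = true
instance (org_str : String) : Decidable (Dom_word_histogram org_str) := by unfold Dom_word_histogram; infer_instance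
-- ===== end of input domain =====

-- B replaces A's incremental hash-counting pass by sort + run-length grouping (uniq -c)
-- plus a first-occurrence rebuild pass; same result, no speed claim (objective: alternative).

-- Shared preprocessing (identical verbatim in A and B): lowercase, the fixed
-- replacement chain, then split on a single space.
def pvIrrelevant : List (List Char) :=
  ["\n", ".", ",", "? ", "! ",
   "the ", "a ", " for ", "by ",
   "and ", "to ", " in ", "with ",
   "is ", "of ", "this ", "was ",
   "all ", "as", "its", "that",
   "\"", "she", "on", "her", " s", " c", " e"].map String.toList

-- PySem.Str.* are thin wrappers over PySem.Chars.* on toList; working on the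
-- code points directly is the same exact Python semantics.
def pvNorm (s : String) : List Char :=
  pvIrrelevant.foldl (fun t r => PySem.Chars.replace t r [' ']) (PySem.Chars.lower s.toList)

def pvTokens (s : String) : List String :=
  -- text.split(" "): PySem.Chars.splitOn is s.split(sep) for sep ≠ ""
  (PySem.Chars.splitOn (pvNorm s) [' ']).map String.ofList

-- ===== PORT A =====
def word_histogram (org_str : String) : List (String × Int) :=
  let word_list := pvTokens org_str
  let word_hist := word_list.foldl
    (fun d w => if d.contains w = false then d.insert w 1 else d.insert w (d.getD w 0 + 1))
    (PySem.Dict.empty : PySem.Dict String Int)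
  -- word_hist.pop of the empty-string key: Python raises KeyError when that key is absent — excluded by Pre_
  (word_hist.erase "").items

-- ===== PORT B =====
-- run-length grouping state: (run, run_len, counts)
def pvGroupStep (st : Option String × Int × PySem.Dict String Int) (w : String) :
    Option String × Int × PySem.Dict String Int :=
  match st with
  | (some r, n, c) => if w = r then (some r, n + 1, c) else (some w, 1, c.insert r n)
  | (none, _, c) => (some w, 1, c)

-- flush the last run after the loop ('if run is not None: counts[run] = run_len')
def pvGroupFin (st : Option String × Int × PySem.Dict String Int) : PySem.Dict String Int :=
  match st with
  | (some r, n, c) => c.insert r n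
  | (none, _, c) => c

-- 'if w != "" and w not in hist: hist[w] = counts[w]' (counts[w] always hits: w ∈ words)
def pvRebuildStep (counts : PySem.Dict String Int) (h : PySem.Dict String Int) (w : String) :
    PySem.Dict String Int :=
  if w ≠ "" ∧ h.contains w = false then h.insert w (counts.getD w 0) else h

def word_histogram_alt (org_str : String) : List (String × Int) :=
  let words := pvTokens org_str
  let counts := pvGroupFin ((PySem.List.sorted words (fun w => w) false).foldl pvGroupStep
    ((none : Option String), (0 : Int), (PySem.Dict.empty : PySem.Dict String Int)))
  let hist := words.foldl (pvRebuildStep counts) (PySem.Dict.empty : PySem.Dict String Int)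
  hist.items

-- ===== PRECONDITION & SPEC =====
-- Pre_ excludes exactly the inputs whose processed text splits into no empty token:
-- there A's final pop of the empty-string key raises KeyError (A returns on no excluded input).
def Pre_word_histogram (org_str : String) : Prop := "" ∈ pvTokens org_str
instance (org_str : String) : Decidable (Pre_word_histogram org_str) := by
  unfold Pre_word_histogram; infer_instance

def pvWitness_word_histogram : String := " "

def Spec_word_histogram (org_str : String) (out : List (String × Int)) : Prop :=
  out = word_histogram_alt org_str
instance (org_str : String) (out : List (String × Int)) : Decidable (Spec_word_histogram org_str out) := by
  unfold Spec_word_histogram; infer_instance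

-- ===== CLAIM (what is proved, stated in full; the proofs are below) =====
def Claim_equal_word_histogram : Prop := ∀ (org_str : String), Dom_word_histogram org_str →
  Pre_word_histogram org_str → Spec_word_histogram org_str (word_histogram org_str)

-- ===== LEMMAS AND PROOFS =====

-- A's counting loop is Counter(words): the membership test is redundant since get-missing defaults to 0.
theorem pvA_fold_eq_counter (ws : List String) :
    ws.foldl (fun d w => if d.contains w = false then d.insert w 1 else d.insert w (d.getD w 0 + 1))
      (PySem.Dict.empty : PySem.Dict String Int) = PySem.Dict.counter ws := by
  rw [PySem.List.foldl_congr_mem ws _ (fun d w => d.insert w (d.getD w 0 + 1)) _ ?_]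
  · exact PySem.Dict.foldl_insert_getD_add_one_eq_counter ws
  · intro d w _
    by_cases h : d.contains w = false
    · simp [h, PySem.Dict.getD_of_not_contains d 0 h]
    · simp [h]

-- the run-length loop, started mid-run (run = r seen n times, all of rest ≥ r)
theorem pvGroup_run (rest : List String) : ∀ (r : String) (n : Int) (c : PySem.Dict String Int),
    rest.Pairwise (· ≤ ·) → (∀ x ∈ rest, r ≤ x) →
    ∀ k, (pvGroupFin (rest.foldl pvGroupStep (some r, n, c))).get? k =
      if k = r then some (n + (rest.count r : Int))
      else if k ∈ rest then some ((rest.count k : Int)) else c.get? k := by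
  induction rest with
  | nil =>
    intro r n c _ _ k
    simp [pvGroupFin, PySem.Dict.get?_insert]
  | cons w rest ih =>
    intro r n c hpw hge k
    have hrw : r ≤ w := hge w (by simp)
    have hpw' : rest.Pairwise (· ≤ ·) := hpw.of_cons
    have hw : ∀ x ∈ rest, w ≤ x := fun x hx => List.rel_of_pairwise_cons hpw hx
    rw [List.foldl_cons]
    by_cases hwr : w = r
    · subst hwr
      rw [show pvGroupStep (some w, n, c) w = (some w, n + 1, c) from by simp [pvGroupStep]]
      rw [ih w (n + 1) c hpw' hw k]
      by_cases hk : k = w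
      · subst hk
        rw [if_pos rfl, if_pos rfl, List.count_cons_self]
        push_cast; ring_nf
      · rw [if_neg hk, if_neg hk]
        simp [List.mem_cons, hk, show w ≠ k from fun h => hk h.symm]
    · have hrw' : r < w := lt_of_le_of_ne hrw (fun h => hwr h.symm)
      have hrns : r ∉ rest := fun hmem => absurd (hw r hmem) (not_le.mpr hrw')
      have hrnw : r ∉ w :: rest := by
        intro hmem
        rcases List.mem_cons.mp hmem with h | h
        · exact hwr h.symm
        · exact hrns h
      rw [show pvGroupStep (some r, n, c) w = (some w, 1, c.insert r n) from by
        simp [pvGroupStep, fun h : w = r => hwr h]]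
      rw [ih w 1 (c.insert r n) hpw' hw k]
      by_cases hk : k = r
      · subst hk
        have hkw : k ≠ w := fun h => hwr h.symm
        rw [if_pos rfl, List.count_eq_zero.mpr hrnw]
        rw [if_neg hkw, if_neg (fun h => hrns h), PySem.Dict.get?_insert, if_pos rfl]
        norm_num
      · rw [if_neg hk]
        by_cases hkw : k = w
        · subst hkw
          rw [if_pos rfl, if_pos (by simp), List.count_cons_self]
          push_cast; ring_nf
        · rw [if_neg hkw]
          simp [List.mem_cons, hkw, PySem.Dict.get?_insert, hk, show w ≠ k from fun h => hkw h.symm]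

-- the whole grouping pass over a sorted list looks up to the multiplicity
theorem pvGroup_main (s : List String) (hs : s.Pairwise (· ≤ ·)) (k : String) :
    (pvGroupFin (s.foldl pvGroupStep
        ((none : Option String), (0 : Int), (PySem.Dict.empty : PySem.Dict String Int)))).get? k =
      if k ∈ s then some ((s.count k : Int)) else none := by
  cases s with
  | nil => simp [pvGroupFin, PySem.Dict.get?_empty]
  | cons w s =>
    rw [List.foldl_cons,
      show pvGroupStep (none, (0 : Int), (PySem.Dict.empty : PySem.Dict String Int)) w
        = (some w, 1, PySem.Dict.empty) from rfl]
    rw [pvGroup_run s w 1 PySem.Dict.empty hs.of_cons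
      (fun x hx => List.rel_of_pairwise_cons hs hx) k]
    by_cases hk : k = w
    · subst hk
      rw [if_pos rfl, if_pos (by simp), List.count_cons_self]
      push_cast; ring_nf
    · rw [if_neg hk]
      simp [List.mem_cons, hk, PySem.Dict.get?_empty, show w ≠ k from fun h => hk h.symm]

-- the rebuild loop appends each new non-empty word once, in first-occurrence order
theorem pvRebuild (counts : PySem.Dict String Int) (ws : List String) :
    ∀ (h : PySem.Dict String Int),
    (ws.foldl (pvRebuildStep counts) h).items
      = h.items ++ ((PySem.Set.ofList ws).filter
          (fun w => !(w == "") && !(h.contains w))).map (fun w => (w, counts.getD w 0)) := by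
  induction ws with
  | nil => intro h; simp [PySem.Set.ofList_nil]
  | cons w ws ih =>
    intro h
    simp only [List.foldl_cons, PySem.Set.ofList_cons]
    by_cases hc : w ≠ "" ∧ h.contains w = false
    · rw [show pvRebuildStep counts h w = h.insert w (counts.getD w 0) from if_pos hc]
      rw [ih (h.insert w (counts.getD w 0))]
      rw [PySem.Dict.items_insert_of_not_contains h _ hc.2]
      have hpredw : (!(w == "") && !(h.contains w)) = true := by
        simp [hc.1, hc.2]
      simp only [List.filter_cons, hpredw, if_pos]
      rw [List.append_assoc]
      congr 1
      simp only [List.map_cons, List.singleton_append]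
      congr 1
      -- filters agree: insert's contains adds exactly the (y == w) test that discard removes
      unfold PySem.Set.discard
      rw [List.filter_filter]
      congr 1
      apply List.filter_congr
      intro y _
      by_cases hyw : y = w
      · subst hyw; simp
      · simp [PySem.Dict.contains_insert, show ¬ (y == w) = true from by simpa using hyw]
    · rw [show pvRebuildStep counts h w = h from if_neg hc]
      rw [ih h]
      have hpredw : (!(w == "") && !(h.contains w)) = false := by
        rcases not_and_or.mp hc with h1 | h2
        · simp [show w = "" from not_not.mp h1]
        · simp [show h.contains w = true from Bool.not_eq_false _ ▸ (by simpa using h2)]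
      simp only [List.filter_cons, hpredw]
      congr 2
      unfold PySem.Set.discard
      rw [List.filter_filter]
      apply List.filter_congr
      intro y _
      by_cases hyw : y = w
      · subst hyw; simp [hpredw]
      · simp [hyw]

-- ===== VERDICT (by name: the statement is the Claim_ definition above) =====
theorem word_histogram_spec : Claim_equal_word_histogram := by
  intro org_str _ _
  unfold Spec_word_histogram
  simp only [word_histogram, word_histogram_alt]
  generalize pvTokens org_str = ws
  -- A's side: Counter, then erase "" = filter over the items
  rw [pvA_fold_eq_counter ws]
  have hA : ((PySem.Dict.counter ws).erase "").items
      = ((PySem.Set.ofList ws).filter (fun w => !(w == ""))).map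
          (fun w => (w, (ws.count w : Int))) := by
    show (((PySem.Dict.counter ws).items).filter (fun p => !(p.1 == ""))) = _
    rw [PySem.Dict.items_counter ws, List.filter_map]
    rfl
  rw [hA]
  -- B's side
  rw [pvRebuild _ ws PySem.Dict.empty]
  have hpred : ∀ w : String, (!(w == "") && !((PySem.Dict.empty : PySem.Dict String Int).contains w))
      = (!(w == "")) := by
    intro w; simp [PySem.Dict.contains_empty]
  rw [List.filter_congr (fun w _ => hpred w)]
  simp only [show (PySem.Dict.empty : PySem.Dict String Int).items = [] from rfl, List.nil_append]
  apply List.map_congr_left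
  intro w hw
  have hwmem : w ∈ ws := by
    have := List.mem_filter.mp hw
    exact (PySem.Set.mem_ofList ws w).mp this.1
  have hsortmem : w ∈ PySem.List.sorted ws (fun w => w) false :=
    ((PySem.List.sorted_perm ws (fun w => w) false).mem_iff).mpr hwmem
  have hcnt : (PySem.List.sorted ws (fun w => w) false).count w = ws.count w :=
    (PySem.List.sorted_perm ws (fun w => w) false).count_eq w
  have hget := pvGroup_main (PySem.List.sorted ws (fun w => w) false)
    (PySem.List.sorted_pairwise ws (fun w => w)) w
  rw [if_pos hsortmem, hcnt] at hget
  rw [PySem.Dict.getD_eq_get?_getD, hget]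
  rfl
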